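-- pv_equiv track=rewrite | github.com/punt-labs/vox | src/punt_vox/hooks.py | resolve_tags_from_signals
-- ===== SOURCE A (Python) =====
-- def resolve_tags_from_signals(signals: str) -> str:
--     """Pick expressive tags from accumulated session signals.
--
--     Deterministic mapping — no LLM needed. Examines signal counts and
--     trajectory (how the session ended) to choose 1-2 ElevenLabs tags.
--     """
--     parts = [s.split("@")[0] for s in signals.split(",") if s]
--     if not parts:
--         return "[calm]"
--
--     counts: dict[str, int] = {}
--     for p in parts:
--         counts[p] = counts.get(p, 0) + 1
--
--     # Trajectory: what happened at the end matters most
--     last_few = parts[-3:]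
--     ended_with_fail = any(s.endswith("-fail") for s in last_few)
--     ended_with_pass = any(s.endswith("-pass") for s in last_few)
--     had_push = "git-push-ok" in counts
--     had_pr = "pr-created" in counts
--     had_fails = sum(c for k, c in counts.items() if k.endswith("-fail"))
--     had_passes = sum(c for k, c in counts.items() if k.endswith("-pass"))
--
--     # Recovery arc: fails followed by passes
--     if had_fails > 0 and ended_with_pass:
--         return "[relieved]"
--
--     # Shipped something
--     if had_push or had_pr:
--         if had_fails == 0:
--             return "[satisfied]"
--         return "[relieved] [satisfied]"
--
--     # Mostly failing
--     if ended_with_fail and had_fails > had_passes: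
--         return "[frustrated] [sighs]"
--
--     # Productive session, all green
--     if had_passes > 3 and had_fails == 0:
--         return "[excited]"
--
--     # Some passes, no drama
--     if had_passes > 0:
--         return "[calm]"
--
--     return "[calm]"
-- ===== SOURCE B (Python) =====
-- def resolve_tags_from_signals(signals: str) -> str:
--     """Pick expressive tags from accumulated session signals.
--
--     Single streaming pass: tallies fail/pass parts and ship flags directly
--     and keeps only the last three parts, instead of building a parts list
--     plus a frequency dict and aggregating over its items.
--     """
--     fails = passes = n = 0
--     had_push = had_pr = False
--     tail = []  # last up to three normalized parts
--     for s in signals.split(","):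
--         if not s:
--             continue
--         p = s.split("@")[0]
--         n += 1
--         if p.endswith("-fail"):
--             fails += 1
--         elif p.endswith("-pass"):
--             passes += 1
--         if p == "git-push-ok":
--             had_push = True
--         elif p == "pr-created":
--             had_pr = True
--         tail.append(p)
--         if len(tail) > 3:
--             tail.pop(0)
--
--     if n == 0:
--         return "[calm]"
--
--     ended_with_fail = any(s.endswith("-fail") for s in tail)
--     ended_with_pass = any(s.endswith("-pass") for s in tail)
--
--     if fails > 0 and ended_with_pass:
--         return "[relieved]"
--     if had_push or had_pr:
--         return "[satisfied]" if fails == 0 else "[relieved] [satisfied]"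
--     if ended_with_fail and fails > passes:
--         return "[frustrated] [sighs]"
--     if passes > 3 and fails == 0:
--         return "[excited]"
--     return "[calm]"
-- ===== Notes on version B (the rewrite author's own statement) =====
-- stated objective: simpler
-- what changed: B replaces A's build-parts-list + frequency-dict + aggregate-over-items pipeline with a single streaming pass that tallies fail/pass counts and ship flags directly and keeps only the last three parts in a bounded buffer.
import Mathlib
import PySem

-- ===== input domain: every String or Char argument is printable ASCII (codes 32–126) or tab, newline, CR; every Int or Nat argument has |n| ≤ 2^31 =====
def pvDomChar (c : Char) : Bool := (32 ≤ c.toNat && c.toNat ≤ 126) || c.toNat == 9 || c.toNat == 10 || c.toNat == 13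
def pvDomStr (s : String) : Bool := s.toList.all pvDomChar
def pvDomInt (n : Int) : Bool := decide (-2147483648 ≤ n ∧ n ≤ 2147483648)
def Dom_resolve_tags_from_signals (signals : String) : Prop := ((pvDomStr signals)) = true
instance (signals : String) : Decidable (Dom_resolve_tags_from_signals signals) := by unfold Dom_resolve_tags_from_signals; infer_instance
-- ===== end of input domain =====

-- B replaces A's parts-list + frequency-dict + aggregate-over-items pipeline with one
-- streaming pass keeping direct tallies and a bounded last-three buffer (objective: simpler).

-- ===== PORT A =====
-- s.split(sep) for a non-empty literal sep: split? is some there, getD never fires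
def pvSplit (s sep : String) : List String := (PySem.Str.split? s sep).getD []

def resolve_tags_from_signals (signals : String) : String :=
  -- parts = [s.split("@")[0] for s in signals.split(",") if s]; split never returns [], so [0] is the head
  let parts := ((pvSplit signals ",").filter (fun s => s ≠ "")).map
      (fun s => (pvSplit s "@").headD "")
  if parts = [] then "[calm]"
  else
    -- counts[p] = counts.get(p, 0) + 1
    let counts := parts.foldl (fun (d : PySem.Dict String Int) p => d.insert p (d.getD p 0 + 1)) PySem.Dict.empty
    let last_few := PySem.List.slice parts (some (-3)) none
    let ended_with_fail := last_few.any (fun s => PySem.Str.endswith s "-fail")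
    let ended_with_pass := last_few.any (fun s => PySem.Str.endswith s "-pass")
    let had_push := counts.contains "git-push-ok"
    let had_pr := counts.contains "pr-created"
    -- sum(c for k, c in counts.items() if k.endswith("-fail"))
    let had_fails : Int := ((counts.items.filter (fun kv => PySem.Str.endswith kv.1 "-fail")).map (·.2)).sum
    let had_passes : Int := ((counts.items.filter (fun kv => PySem.Str.endswith kv.1 "-pass")).map (·.2)).sum
    if 0 < had_fails ∧ ended_with_pass = true then "[relieved]"
    else if had_push = true ∨ had_pr = true then
      (if had_fails = 0 then "[satisfied]" else "[relieved] [satisfied]")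
    else if ended_with_fail = true ∧ had_passes < had_fails then "[frustrated] [sighs]"
    else if 3 < had_passes ∧ had_fails = 0 then "[excited]"
    else if 0 < had_passes then "[calm]"
    else "[calm]"

-- ===== PORT B =====
-- one loop step of Source B: state (fails, passes, n, had_push, had_pr, tail)
def pvStepB (st : Int × Int × Int × Bool × Bool × List String) (s : String) :
    Int × Int × Int × Bool × Bool × List String :=
  if s = "" then st
  else
    match st with
    | (fails, passes, n, push, pr, tail) =>
    let p := (pvSplit s "@").headD ""
    let tail' := tail ++ [p]
    ((if PySem.Str.endswith p "-fail" then fails + 1 else fails),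
     -- elif: passes bumps only when the -fail branch did not fire
     (if PySem.Str.endswith p "-fail" then passes
      else if PySem.Str.endswith p "-pass" then passes + 1 else passes),
     n + 1,
     (if p = "git-push-ok" then true else push),
     (if p = "git-push-ok" then pr else if p = "pr-created" then true else pr),
     -- tail.append(p); if len(tail) > 3: tail.pop(0)
     (if 3 < tail'.length then tail'.drop 1 else tail'))

def resolve_tags_from_signals_alt (signals : String) : String :=
  match (pvSplit signals ",").foldl pvStepB (0, 0, 0, false, false, []) with
  | (fails, passes, n, push, pr, tail) =>
  if n = 0 then "[calm]"
  else
    let ended_with_fail := tail.any (fun s => PySem.Str.endswith s "-fail")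
    let ended_with_pass := tail.any (fun s => PySem.Str.endswith s "-pass")
    if 0 < fails ∧ ended_with_pass = true then "[relieved]"
    else if push = true ∨ pr = true then
      (if fails = 0 then "[satisfied]" else "[relieved] [satisfied]")
    else if ended_with_fail = true ∧ passes < fails then "[frustrated] [sighs]"
    else if 3 < passes ∧ fails = 0 then "[excited]"
    else "[calm]"

-- ===== PRECONDITION & SPEC =====
def Spec_resolve_tags_from_signals (signals : String) (out : String) : Prop := out = resolve_tags_from_signals_alt signals
instance (signals : String) (out : String) : Decidable (Spec_resolve_tags_from_signals signals out) := by unfold Spec_resolve_tags_from_signals; infer_instance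

-- ===== CLAIM (what is proved, stated in full; the proofs are below) =====
def Claim_equal_resolve_tags_from_signals : Prop := ∀ (signals : String), Dom_resolve_tags_from_signals signals → Spec_resolve_tags_from_signals signals (resolve_tags_from_signals signals)

-- ===== LEMMAS AND PROOFS =====

-- normalized parts list both programs walk over
def pvParts (toks : List String) : List String :=
  (toks.filter (fun s => s ≠ "")).map (fun s => (pvSplit s "@").headD "")

def pvLastN3 (l : List String) : List String := l.drop (l.length - 3)

theorem pvParts_nil : pvParts [] = [] := rfl

theorem pvParts_cons (t : String) (ts : List String) :
    pvParts (t :: ts) = if t = "" then pvParts ts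
      else (pvSplit t "@").headD "" :: pvParts ts := by
  by_cases h : t = "" <;> simp [pvParts, h]

theorem pvLastN3_drop1 (u r : List String) (h : 3 < u.length) :
    pvLastN3 (u.drop 1 ++ r) = pvLastN3 (u ++ r) := by
  unfold pvLastN3
  have h1 : (u ++ r).drop ((u ++ r).length - 3) = ((u ++ r).drop 1).drop ((u ++ r).length - 4) := by
    rw [List.drop_drop]; congr 1; simp; omega
  have h2 : (u ++ r).drop 1 = u.drop 1 ++ r := by
    rw [List.drop_append_of_le_length (by omega)]
  rw [h1, h2]; congr 1; simp; omega

theorem pvStepB_char (toks : List String) :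
    ∀ (fails passes n : Int) (push pr : Bool) (tail : List String), tail.length ≤ 3 →
    toks.foldl pvStepB (fails, passes, n, push, pr, tail) =
      (fails + (pvParts toks).countP (fun p => PySem.Str.endswith p "-fail"),
       passes + (pvParts toks).countP
         (fun p => !(PySem.Str.endswith p "-fail") && PySem.Str.endswith p "-pass"),
       n + (pvParts toks).length,
       push || (pvParts toks).any (fun p => p == "git-push-ok"),
       pr || (pvParts toks).any (fun p => !(p == "git-push-ok") && (p == "pr-created")),
       pvLastN3 (tail ++ pvParts toks)) := by
  induction toks with
  | nil =>
    intro fails passes n push pr tail ht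
    have h0 : tail.length - 3 = 0 := by omega
    simp [pvParts_nil, pvLastN3, h0]
  | cons t ts ih =>
    intro fails passes n push pr tail ht
    by_cases h0 : t = ""
    · simp only [List.foldl_cons, pvStepB, h0, if_true, pvParts_cons]
      exact ih fails passes n push pr tail ht
    · rw [List.foldl_cons, pvParts_cons]
      simp only [h0, if_false]
      have hstep : pvStepB (fails, passes, n, push, pr, tail) t =
          ((if PySem.Str.endswith ((pvSplit t "@").headD "") "-fail" then fails + 1 else fails),
           (if PySem.Str.endswith ((pvSplit t "@").headD "") "-fail" then passes
            else if PySem.Str.endswith ((pvSplit t "@").headD "") "-pass" then passes + 1 else passes),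
           n + 1,
           (if (pvSplit t "@").headD "" = "git-push-ok" then true else push),
           (if (pvSplit t "@").headD "" = "git-push-ok" then pr
            else if (pvSplit t "@").headD "" = "pr-created" then true else pr),
           (if 3 < (tail ++ [(pvSplit t "@").headD ""]).length then (tail ++ [(pvSplit t "@").headD ""]).drop 1
            else tail ++ [(pvSplit t "@").headD ""])) := by
        simp only [pvStepB, h0, if_false]
      rw [hstep]
      set p := (pvSplit t "@").headD "" with hp
      set tail' := (if 3 < (tail ++ [p]).length then (tail ++ [p]).drop 1 else tail ++ [p]) with htl
      have ht' : tail'.length ≤ 3 := by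
        rw [htl]; split <;> simp_all
      rw [ih _ _ _ _ _ _ ht']
      have htail : pvLastN3 (tail' ++ pvParts ts) = pvLastN3 (tail ++ p :: pvParts ts) := by
        rw [htl]
        split
        · rw [pvLastN3_drop1 _ _ (by assumption)]
          simp
        · simp
      rw [htail]
      simp only [List.countP_cons, List.any_cons, Prod.mk.injEq]
      refine ⟨?_, ?_, ?_, ?_, ?_, ?_⟩
      · split_ifs <;> push_cast <;> omega
      · split_ifs <;> first | (push_cast; omega) | simp_all
      · push_cast [List.length_cons]; ring
      · by_cases hu : p = "git-push-ok"
        · simp [hu]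
        · have hb : (p == "git-push-ok") = false := beq_eq_false_iff_ne.mpr hu
          simp [hu, hb]
      · by_cases hu : p = "git-push-ok" <;> by_cases hv : p = "pr-created"
        · exact absurd (hu ▸ hv) (by decide)
        · simp [hu]
        · simp [hv]
        · have hb : (p == "git-push-ok") = false := beq_eq_false_iff_ne.mpr hu
          have hc : (p == "pr-created") = false := beq_eq_false_iff_ne.mpr hv
          simp [hu, hv, hb, hc]
      · trivial

-- a string cannot end with both "-fail" and "-pass"
theorem pv_not_fail_and_pass (p : String) (hf : PySem.Str.endswith p "-fail" = true) :
    PySem.Str.endswith p "-pass" = false := by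
  by_contra h
  have hq : PySem.Str.endswith p "-pass" = true := by
    cases hx : PySem.Str.endswith p "-pass" <;> simp_all
  have h1 : "-fail".toList <:+ p.toList := by
    have := (PySem.Chars.endswith_iff (s := p.toList) (p := "-fail".toList)).1
    simp at hf; exact this hf
  have h2 : "-pass".toList <:+ p.toList := by
    have := (PySem.Chars.endswith_iff (s := p.toList) (p := "-pass".toList)).1
    simp at hq; exact this hq
  rcases List.suffix_or_suffix_of_suffix h1 h2 with hs | hs
  · have := List.IsSuffix.eq_of_length hs (by decide)
    simp at this
  · have := List.IsSuffix.eq_of_length hs (by decide)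
    simp at this

-- sum of per-key counts over the distinct keys satisfying p = countP p
theorem pv_sum_ind (x : String) (l : List String) :
    (l.map (fun k => if k == x then (1 : Int) else 0)).sum = l.count x := by
  induction l with
  | nil => simp
  | cons a l ih =>
    by_cases h : a = x
    · subst h
      simp only [List.map_cons, List.sum_cons, beq_self_eq_true, if_true, List.count_cons]
      push_cast
      rw [ih]; ring
    · have h2 : (a == x) = false := beq_eq_false_iff_ne.mpr h
      simp only [List.map_cons, List.sum_cons, h2, Bool.false_eq_true, if_false, List.count_cons]
      push_cast
      rw [ih]; ring

theorem pv_sum_map_add (l : List String) (f g : String → Int) :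
    (l.map (fun k => f k + g k)).sum = (l.map f).sum + (l.map g).sum := by
  induction l with
  | nil => simp
  | cons a l ih => simp [ih]; ring

theorem pv_sum_counts (p : String → Bool) (s : List String) (hn : s.Nodup) :
    ∀ (xs : List String), (∀ x ∈ xs, x ∈ s) →
    ((s.filter p).map (fun k => (xs.count k : Int))).sum = xs.countP p := by
  intro xs
  induction xs with
  | nil => intro _; simp
  | cons x xs ih =>
    intro hm
    have hx : x ∈ s := hm x (by simp)
    have hrec := ih (fun y hy => hm y (by simp [hy]))
    have hcnt : ∀ k : String, ((x :: xs).count k : Int) = (xs.count k : Int) + (if k == x then 1 else 0) := by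
      intro k
      by_cases h : k = x
      · subst h; simp
      · have h1 : (x == k) = false := beq_eq_false_iff_ne.mpr (Ne.symm h)
        simp [List.count_cons, h1, h]
    calc ((s.filter p).map (fun k => ((x :: xs).count k : Int))).sum
        = ((s.filter p).map (fun k => (xs.count k : Int) + (if k == x then 1 else 0))).sum := by
          exact congrArg List.sum (List.map_congr_left (fun k _ => hcnt k))
      _ = ((s.filter p).map (fun k => (xs.count k : Int))).sum
            + ((s.filter p).map (fun k => if k == x then (1 : Int) else 0)).sum :=
          pv_sum_map_add _ _ _
      _ = (xs.countP p : Int) + (((s.filter p).count x : Nat) : Int) := by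
          rw [hrec, pv_sum_ind]
      _ = ((x :: xs).countP p : Int) := by
          by_cases h : p x
          · rw [List.count_filter h, List.count_eq_one_of_mem hn hx]
            simp [h]
          · rw [List.count_eq_zero.mpr (by simp [h])]
            simp [h]

-- A's items-sum over the counter dict, in terms of countP
theorem pv_items_sum (parts : List String) (p : String → Bool) :
    ((((PySem.Dict.counter parts : PySem.Dict String Int).items.filter
        (fun kv => p kv.1)).map (·.2)).sum) = parts.countP p := by
  rw [PySem.Dict.items_counter, List.filter_map, List.map_map]
  simp only [Function.comp_def]
  exact pv_sum_counts p _ (PySem.Set.nodup_ofList parts) parts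
    (fun x hx => (PySem.Set.mem_ofList parts x).2 hx)

-- ===== VERDICT (by name: the statement is the Claim_ definition above) =====
theorem resolve_tags_from_signals_spec : Claim_equal_resolve_tags_from_signals := by
  intro signals _
  unfold Spec_resolve_tags_from_signals resolve_tags_from_signals resolve_tags_from_signals_alt
  rw [pvStepB_char _ 0 0 0 false false [] (by simp)]
  simp only [zero_add, Bool.false_or, List.nil_append]
  rw [show List.map (fun s => (pvSplit s "@").headD "")
      (List.filter (fun s => decide (s ≠ "")) (pvSplit signals ",")) = pvParts (pvSplit signals ",") from rfl]
  set P := pvParts (pvSplit signals ",") with hPdef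
  by_cases hP : P = []
  · simp [hP]
  · rw [if_neg hP]
    have hn0 : ¬ ((P.length : Int) = 0) := by
      simp only [Int.natCast_eq_zero, List.length_eq_zero_iff]
      exact hP
    have hpass : P.countP (fun p => !(PySem.Str.endswith p "-fail") && PySem.Str.endswith p "-pass")
        = P.countP (fun p => PySem.Str.endswith p "-pass") := by
      apply List.countP_congr
      intro x _
      by_cases hf : PySem.Str.endswith x "-fail"
      · rw [hf, pv_not_fail_and_pass x hf]; simp
      · simp only [Bool.not_eq_true] at hf
        rw [hf]; simp
    have hpush : (P.any fun p => p == "git-push-ok") = P.contains "git-push-ok" := List.any_beq'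
    have hpr : (P.any fun p => !(p == "git-push-ok") && (p == "pr-created")) = P.contains "pr-created" := by
      rw [← List.any_beq']
      apply PySem.List.any_congr_mem
      intro x _
      by_cases hv : x = "pr-created"
      · subst hv; simp
      · have hc : (x == "pr-created") = false := beq_eq_false_iff_ne.mpr hv
        simp [hc]
    have hfails := pv_items_sum P (fun p => PySem.Str.endswith p "-fail")
    have hpasses := pv_items_sum P (fun p => PySem.Str.endswith p "-pass")
    simp only [PySem.Dict.foldl_insert_getD_add_one_eq_counter, hfails, hpasses,
      PySem.Dict.contains_counter, PySem.List.slice_from_neg_ofNat P 3 (by norm_num),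
      pvLastN3, hpass, hpush, hpr]
    rw [if_neg hn0]
    split_ifs <;> rfl
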